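-- pv_equiv track=rewrite | github.com/jooyun-1/PS_repo | 프로그래머스/lv2/131127. 할인 행사/할인 행사.py | solution
-- ===== SOURCE A (Python) =====
-- from collections import defaultdict
--
-- def solution(want, number, discount):
--     answer = 0
--     goods = dict()
--     discount_goods  = defaultdict(int)
--     cnt = 0
--     for i in range(len(want)) :
--         goods[want[i]] = number[i]
--     for i in range(len(discount)-9) :
--         discount_goods = defaultdict(int)
--         cnt += 1
--         for j in range(i,i+10) :
--             discount_goods[discount[j]] += 1
--         flag = True
--         for k in range(len(want)) :
--             if discount_goods[want[k]] != number[k] :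
--                 flag = False
--                 break
--         if flag == True :
--             answer += 1
--
--     return answer
-- ===== SOURCE B (Python) =====
-- def solution(want, number, discount):
--     need = {}
--     for w, n in zip(want, number):
--         need[w] = n
--     if len(discount) < 10:
--         return 0
--     counts = {}
--     for item in discount[:10]:
--         counts[item] = counts.get(item, 0) + 1
--     satisfied = sum(1 for w, n in need.items() if counts.get(w, 0) == n)
--     answer = 1 if satisfied == len(need) else 0
--     for out, inc in zip(discount, discount[10:]):
--         if out != inc:
--             if counts.get(out, 0) == need.get(out):
--                 satisfied -= 1
--             counts[out] -= 1
--             if counts.get(out, 0) == need.get(out):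
--                 satisfied += 1
--             if counts.get(inc, 0) == need.get(inc):
--                 satisfied -= 1
--             counts[inc] = counts.get(inc, 0) + 1
--             if counts.get(inc, 0) == need.get(inc):
--                 satisfied += 1
--         if satisfied == len(need):
--             answer += 1
--     return answer
-- ===== Notes on version B (the rewrite author's own statement) =====
-- stated objective: faster
-- what changed: A rebuilds a fresh 10-item counter dict and rescans the whole want list for every window; B builds the wanted-quantity dict once and makes a single sliding-window pass, updating the item counts and a satisfied-items counter incrementally per step. Pre_ excludes want lists with duplicate items carrying conflicting quantities (when a 10-day window exists), a corner on which A's per-index comparison and B's dict semantics are both defensible readings of duplicate keys.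
import Mathlib
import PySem

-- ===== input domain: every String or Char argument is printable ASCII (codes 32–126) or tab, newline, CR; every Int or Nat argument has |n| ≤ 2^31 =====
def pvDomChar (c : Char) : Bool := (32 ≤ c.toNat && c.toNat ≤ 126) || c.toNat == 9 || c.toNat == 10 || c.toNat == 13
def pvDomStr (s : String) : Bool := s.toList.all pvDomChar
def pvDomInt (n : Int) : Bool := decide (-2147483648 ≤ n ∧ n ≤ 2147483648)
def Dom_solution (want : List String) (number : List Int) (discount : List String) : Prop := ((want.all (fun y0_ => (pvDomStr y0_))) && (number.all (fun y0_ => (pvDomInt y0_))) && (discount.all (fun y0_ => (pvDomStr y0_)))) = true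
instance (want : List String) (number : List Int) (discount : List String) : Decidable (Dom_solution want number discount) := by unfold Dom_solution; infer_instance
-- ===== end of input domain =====

-- B replaces A's per-window recount (rebuild a 10-item counter dict and rescan `want` for each
-- of the n-9 windows) by a single sliding-window pass with incremental counts and a
-- satisfied-items counter; objective: faster (asymptotic, O(n+w) vs O(n*(10+w))).

-- ===== PORT A =====
def solution (want : List String) (number : List Int) (discount : List String) : Int :=
  let _goods : PySem.Dict String Int :=
    (PySem.List.pyRange 0 (want.length : Int) 1).foldl
      (fun g i => g.insert (PySem.List.pyGetD want i "") (PySem.List.pyGetD number i 0))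
      PySem.Dict.empty
  -- `goods` is built by A but never read afterwards; `cnt` only counts iterations and is dropped.
  -- want[i]/number[i]/discount[j] are ported with pyGetD: inside Pre_ every index is in range.
  (PySem.List.pyRange 0 ((discount.length : Int) - 9) 1).foldl
    (fun answer i =>
      let dg : PySem.Dict String Int :=
        (PySem.List.pyRange i (i + 10) 1).foldl
          (fun d j => d.modify (PySem.List.pyGetD discount j "") 0 (· + 1))
          PySem.Dict.empty
      let flag : Bool :=
        (PySem.List.pyRange 0 (want.length : Int) 1).foldl
          (fun f k =>
            if f then
              if dg.getD (PySem.List.pyGetD want k "") 0 ≠ PySem.List.pyGetD number k 0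
              then false else f
            else f)
          true
      if flag then answer + 1 else answer)
    0

-- ===== PORT B =====
-- loop body of B's sliding-window pass (state: counts dict, satisfied counter, answer)
def altStep (need : PySem.Dict String Int)
    (st : PySem.Dict String Int × Int × Int) (pr : String × String) :
    PySem.Dict String Int × Int × Int :=
  if pr.1 ≠ pr.2 then
    let s1 := if some (st.1.getD pr.1 0) == need.get? pr.1 then st.2.1 - 1 else st.2.1
    let counts1 := st.1.insert pr.1 (st.1.getD pr.1 0 - 1)
    let s2 := if some (counts1.getD pr.1 0) == need.get? pr.1 then s1 + 1 else s1
    let s3 := if some (counts1.getD pr.2 0) == need.get? pr.2 then s2 - 1 else s2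
    let counts2 := counts1.insert pr.2 (counts1.getD pr.2 0 + 1)
    let s4 := if some (counts2.getD pr.2 0) == need.get? pr.2 then s3 + 1 else s3
    (counts2, s4, if s4 = (need.size : Int) then st.2.2 + 1 else st.2.2)
  else
    (st.1, st.2.1, if st.2.1 = (need.size : Int) then st.2.2 + 1 else st.2.2)

def solution_alt (want : List String) (number : List Int) (discount : List String) : Int :=
  let need : PySem.Dict String Int :=
    (want.zip number).foldl (fun d p => d.insert p.1 p.2) PySem.Dict.empty
  if discount.length < 10 then 0
  else
    let counts : PySem.Dict String Int :=
      (PySem.List.slice discount none (some 10)).foldl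
        (fun d x => d.insert x (d.getD x 0 + 1)) PySem.Dict.empty
    let satisfied : Int := (need.items.countP (fun p => counts.getD p.1 0 == p.2) : Int)
    let answer : Int := if satisfied = (need.size : Int) then 1 else 0
    let r := (discount.zip (PySem.List.slice discount (some 10) none)).foldl
      (altStep need) (counts, satisfied, answer)
    r.2.2

-- ===== PRECONDITION & SPEC =====
-- Pre_ excludes (a) inputs with len(want) > len(number), on which A raises IndexError reading
-- number[i], and (b) when at least one 10-day window exists, want lists with duplicate items
-- carrying conflicting quantities — a corner on which A's per-index comparison (never
-- satisfiable) and B's dict semantics (last value wins) are both defensible readings of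
-- duplicate keys.
def Pre_solution (want : List String) (number : List Int) (discount : List String) : Prop :=
  want.length ≤ number.length ∧
  (10 ≤ discount.length →
    ∀ p ∈ want.zip number, ∀ q ∈ want.zip number, p.1 = q.1 → p.2 = q.2)
instance (want : List String) (number : List Int) (discount : List String) : Decidable (Pre_solution want number discount) := by unfold Pre_solution; infer_instance

def pvWitness_solution : List String × List Int × List String :=
  (["a"], [2], ["a", "b", "a", "b", "b", "b", "b", "b", "b", "b", "a"])

def Spec_solution (want : List String) (number : List Int) (discount : List String) (out : Int) : Prop := out = solution_alt want number discount
instance (want : List String) (number : List Int) (discount : List String) (out : Int) : Decidable (Spec_solution want number discount out) := by unfold Spec_solution; infer_instance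

-- ===== CLAIM (what is proved, stated in full; the proofs are below) =====
def Claim_equal_solution : Prop := ∀ (want : List String) (number : List Int) (discount : List String), Dom_solution want number discount → Pre_solution want number discount → Spec_solution want number discount (solution want number discount)

-- ===== LEMMAS AND PROOFS =====

-- the window of 10 items starting at position t, and the number of satisfied wanted items there
def pvWin (L : List String) (t : Nat) : List String := (L.drop t).take 10

def pvSat (need : PySem.Dict String Int) (L : List String) (t : Nat) : Int :=
  (need.items.countP (fun p => ((pvWin L t).count p.1 : Int) == p.2) : Int)

-- A's flag for window start i, as a standalone function (definitionally the port's inner code)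
def pvFlagA (want : List String) (number : List Int) (discount : List String) (i : Int) : Bool :=
  let dg : PySem.Dict String Int :=
    (PySem.List.pyRange i (i + 10) 1).foldl
      (fun d j => d.modify (PySem.List.pyGetD discount j "") 0 (· + 1))
      PySem.Dict.empty
  (PySem.List.pyRange 0 (want.length : Int) 1).foldl
    (fun f k =>
      if f then
        if dg.getD (PySem.List.pyGetD want k "") 0 ≠ PySem.List.pyGetD number k 0
        then false else f
      else f)
    true

theorem pv_solution_eq (want : List String) (number : List Int) (discount : List String) :
    solution want number discount
      = 0 + (((PySem.List.pyRange 0 ((discount.length : Int) - 9) 1).countP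
          (pvFlagA want number discount)) : Int) := by
  show (PySem.List.pyRange 0 ((discount.length : Int) - 9) 1).foldl
      (fun answer i => if pvFlagA want number discount i then answer + 1 else answer) 0 = _
  exact PySem.List.foldl_if_add_one _ _ _

-- membership in zip, index form
theorem pv_mem_zip_iff (want : List String) (number : List Int)
    (hlen : want.length ≤ number.length) (p : String × Int) :
    p ∈ want.zip number ↔ ∃ (k : Nat) (hk : k < want.length),
      p = (want[k], number[k]'(by omega)) := by
  constructor
  · intro hp
    rcases List.mem_iff_getElem.mp hp with ⟨k, hk, he⟩
    have hkz : k < want.length := by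
      have := hk; simp [List.length_zip] at this; omega
    exact ⟨k, hkz, by rw [← he, List.getElem_zip]⟩
  · rintro ⟨k, hk, rfl⟩
    apply List.mem_iff_getElem.mpr
    refine ⟨k, by simp [List.length_zip]; omega, ?_⟩
    rw [List.getElem_zip]

-- facts about the dict built by folding inserts over a pair list
theorem pv_items_foldl_insert (l : List (String × Int)) (d : PySem.Dict String Int)
    (p : String × Int)
    (hp : p ∈ (l.foldl (fun d q => d.insert q.1 q.2) d).items) : p ∈ d.items ∨ p ∈ l := by
  induction l generalizing d with
  | nil => exact Or.inl hp
  | cons q tl ih =>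
      rcases ih _ hp with h | h
      · rw [PySem.Dict.mem_items_insert] at h
        rcases h with rfl | ⟨h, _⟩
        · exact Or.inr (by simp)
        · exact Or.inl h
      · exact Or.inr (List.mem_cons_of_mem _ h)

theorem pv_contains_foldl_insert_mono (l : List (String × Int)) (d : PySem.Dict String Int)
    (k : String) (h : d.contains k = true) :
    (l.foldl (fun d q => d.insert q.1 q.2) d).contains k = true := by
  induction l generalizing d with
  | nil => exact h
  | cons q tl ih =>
      exact ih _ (by rw [PySem.Dict.contains_insert, h]; simp)

theorem pv_contains_foldl_insert_of_mem (l : List (String × Int)) (d : PySem.Dict String Int)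
    (p : String × Int) (hp : p ∈ l) :
    (l.foldl (fun d q => d.insert q.1 q.2) d).contains p.1 = true := by
  induction l generalizing d with
  | nil => cases hp
  | cons q tl ih =>
      rcases List.mem_cons.mp hp with rfl | h
      · rw [List.foldl_cons]
        exact pv_contains_foldl_insert_mono tl _ p.1 (PySem.Dict.contains_insert_self d p.1 p.2)
      · exact ih _ h

theorem pv_need_nodup (zs : List (String × Int)) :
    (zs.foldl (fun d p => d.insert p.1 p.2) PySem.Dict.empty).keys.Nodup :=
  PySem.Dict.nodup_keys_foldl_insert_key zs Prod.fst (fun _ p => p.2) PySem.Dict.empty (by simp)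

-- under pairwise-consistency of zs, the dict built from zs stores exactly the zs values
theorem pv_cons_of_consistent (zs : List (String × Int))
    (hcons : ∀ p ∈ zs, ∀ q ∈ zs, p.1 = q.1 → p.2 = q.2) :
    ∀ p ∈ zs, (zs.foldl (fun d p => d.insert p.1 p.2) PySem.Dict.empty).get? p.1 = some p.2 := by
  intro p hp
  have hco : (zs.foldl (fun d p => d.insert p.1 p.2) PySem.Dict.empty).contains p.1 = true :=
    pv_contains_foldl_insert_of_mem _ _ _ hp
  rcases hv : (zs.foldl (fun d p => d.insert p.1 p.2) PySem.Dict.empty).get? p.1 with _ | v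
  · rw [PySem.Dict.get?_eq_none_iff_contains] at hv
    rw [hv] at hco; cases hco
  · have hmem : (p.1, v) ∈ (zs.foldl (fun d p => d.insert p.1 p.2) PySem.Dict.empty).items :=
      (PySem.Dict.get?_eq_some_iff_mem_items _ p.1 v (pv_need_nodup zs)).mp hv
    have hz : (p.1, v) ∈ zs := by
      rcases pv_items_foldl_insert zs _ _ hmem with h | h
      · simp [PySem.Dict.empty] at h
      · exact h
    have : v = p.2 := hcons (p.1, v) hz p hp rfl
    rw [hv, this]

theorem pv_all_iff (zs : List (String × Int)) (F : String → Int)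
    (hcons : ∀ p ∈ zs,
      (zs.foldl (fun d p => d.insert p.1 p.2) PySem.Dict.empty).get? p.1 = some p.2) :
    (∀ p ∈ zs, F p.1 = p.2)
      ↔ (∀ p ∈ (zs.foldl (fun d p => d.insert p.1 p.2) PySem.Dict.empty).items, F p.1 = p.2) := by
  constructor
  · intro h p hp
    rcases pv_items_foldl_insert zs _ _ hp with h' | h'
    · simp [PySem.Dict.empty] at h'
    · exact h _ h'
  · intro h p hp
    have hm : (p.1, p.2) ∈ (zs.foldl (fun d p => d.insert p.1 p.2) PySem.Dict.empty).items :=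
      (PySem.Dict.get?_eq_some_iff_mem_items _ _ _ (pv_need_nodup zs)).mp (hcons p hp)
    exact h _ hm

-- changing a count function at one key moves the satisfied count by the indicators at that key
theorem pv_sat_delta (l : List (String × Int)) (hnd : (l.map Prod.fst).Nodup)
    (f f' : String → Int) (k : String) (h : ∀ x, x ≠ k → f' x = f x) :
    (l.countP (fun p => f' p.1 == p.2) : Int)
      = (l.countP (fun p => f p.1 == p.2) : Int)
        + (if some (f' k) == (PySem.Dict.mk l).get? k then 1 else 0)
        - (if some (f k) == (PySem.Dict.mk l).get? k then 1 else 0) := by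
  induction l with
  | nil => simp [PySem.Dict.get?]
  | cons hd tl ih =>
      obtain ⟨a, v⟩ := hd
      simp only [List.map_cons, List.nodup_cons] at hnd
      obtain ⟨ha, hnd'⟩ := hnd
      rw [PySem.Dict.get?_mk_cons]
      by_cases hak : a = k
      · have hck : (a == k) = true := by simp [hak]
        rw [if_pos hck]
        subst hak
        have htl : tl.countP (fun p => f' p.1 == p.2) = tl.countP (fun p => f p.1 == p.2) := by
          apply List.countP_congr
          intro p hp
          have hpk : p.1 ≠ a := fun hc => ha (by rw [← hc]; exact List.mem_map_of_mem hp)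
          rw [h p.1 hpk]
        simp only [List.countP_cons, htl]
        push_cast
        simp only [Option.some_beq_some]
        split_ifs <;> omega
      · have hbeq : (a == k) = false := by simp [hak]
        rw [hbeq]
        simp only [Bool.false_eq_true, if_false]
        simp only [List.countP_cons]
        have hhd : (f' a == v) = (f a == v) := by rw [h a hak]
        rw [hhd]
        have hih := ih hnd'
        push_cast at hih ⊢
        split_ifs at hih ⊢ <;> omega

-- window shape lemmas
theorem pv_win_cons (L : List String) (t : Nat) (ht : t < L.length) :
    pvWin L t = L[t] :: (L.drop (t + 1)).take 9 := by
  unfold pvWin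
  rw [List.drop_eq_getElem_cons ht, show (10 : Nat) = 9 + 1 from rfl, List.take_succ_cons]

theorem pv_win_snoc (L : List String) (t : Nat) (ht : t + 10 < L.length) :
    pvWin L (t + 1) = (L.drop (t + 1)).take 9 ++ [L[t + 10]] := by
  unfold pvWin
  rw [show (L.drop (t + 1)).take 10 = (L.drop (t + 1)).take (9 + 1) from rfl, List.take_succ]
  congr 1
  rw [List.getElem?_drop]
  rw [List.getElem?_eq_getElem (show t + 1 + 9 < L.length by omega)]
  rfl

theorem pv_count_win (L : List String) (t : Nat) (ht : t + 10 < L.length) (x : String) :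
    (((pvWin L t).count x : Int)
        = (((L.drop (t + 1)).take 9).count x : Int) + (if x = L[t]'(by omega) then 1 else 0))
    ∧ (((pvWin L (t + 1)).count x : Int)
        = (((L.drop (t + 1)).take 9).count x : Int) + (if x = L[t + 10]'ht then 1 else 0)) := by
  constructor
  · rw [pv_win_cons L t (by omega)]
    by_cases hx : x = L[t]'(by omega)
    · subst hx; simp [List.count_cons]
    · have hb : (L[t]'(by omega) == x) = false := beq_eq_false_iff_ne.mpr (fun h => hx h.symm)
      rw [List.count_cons, hb]
      simp [hx]
  · rw [pv_win_snoc L t ht, List.count_append]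
    by_cases hx : x = L[t + 10]'ht
    · subst hx; simp [List.count_cons]
    · have hb : (L[t + 10]'ht == x) = false := beq_eq_false_iff_ne.mpr (fun h => hx h.symm)
      simp [List.count_cons, hb, hx]

-- the sliding-window step preserves the invariants
theorem pv_step_ok (need : PySem.Dict String Int) (L : List String) (t : Nat)
    (counts : PySem.Dict String Int) (satisfied answer : Int)
    (hnd : need.keys.Nodup) (ht : t + 10 < L.length)
    (hc : ∀ x, counts.getD x 0 = ((pvWin L t).count x : Int))
    (hs : satisfied = pvSat need L t) :
    ∃ c' : PySem.Dict String Int,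
      altStep need (counts, satisfied, answer) (L[t]'(by omega), L[t + 10]'ht)
        = (c', pvSat need L (t + 1),
            answer + (if pvSat need L (t + 1) = (need.size : Int) then 1 else 0))
      ∧ ∀ x, c'.getD x 0 = ((pvWin L (t + 1)).count x : Int) := by
  have ht' : t < L.length := by omega
  by_cases hoi : L[t]'ht' = L[t + 10]'ht
  · -- leaving and entering items coincide: the window multiset does not change
    have hcnt : ∀ x, ((pvWin L (t + 1)).count x : Int) = ((pvWin L t).count x : Int) := by
      intro x
      rw [(pv_count_win L t ht x).1, (pv_count_win L t ht x).2, hoi]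
    have hsat : pvSat need L (t + 1) = pvSat need L t := by
      unfold pvSat
      congr 1
      apply List.countP_congr
      intro p hp
      rw [hcnt p.1]
    refine ⟨counts, ?_, fun x => by rw [hc x, ← hcnt x]⟩
    simp only [altStep, ne_eq]
    rw [if_neg (not_not_intro hoi)]
    have harith : (if satisfied = (need.size : Int) then answer + 1 else answer)
        = answer + (if pvSat need L (t + 1) = (need.size : Int) then 1 else 0) := by
      rw [hsat, ← hs]; split_ifs <;> omega
    rw [harith, hsat, ← hs]
  · -- out ≠ inc
    have hne : L[t]'ht' ≠ L[t + 10]'ht := hoi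
    have hmid1 : ∀ x, ((pvWin L t).count x : Int)
        = (((L.drop (t + 1)).take 9).count x : Int) + (if x = L[t]'ht' then 1 else 0) :=
      fun x => (pv_count_win L t ht x).1
    have hmid2 : ∀ x, ((pvWin L (t + 1)).count x : Int)
        = (((L.drop (t + 1)).take 9).count x : Int) + (if x = L[t + 10]'ht then 1 else 0) :=
      fun x => (pv_count_win L t ht x).2
    have hndl : (need.items.map Prod.fst).Nodup := hnd
    have h1 : ∀ x, ((counts.insert (L[t]'ht') (counts.getD (L[t]'ht') 0 - 1)).getD x 0)
        = if x = L[t]'ht' then counts.getD (L[t]'ht') 0 - 1 else counts.getD x 0 :=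
      fun x => PySem.Dict.getD_insert counts _ x _ 0
    have h2 : ∀ x, (((counts.insert (L[t]'ht') (counts.getD (L[t]'ht') 0 - 1)).insert
            (L[t + 10]'ht)
            ((counts.insert (L[t]'ht') (counts.getD (L[t]'ht') 0 - 1)).getD (L[t + 10]'ht) 0 + 1)).getD x 0)
        = if x = L[t + 10]'ht
          then (counts.insert (L[t]'ht') (counts.getD (L[t]'ht') 0 - 1)).getD (L[t + 10]'ht) 0 + 1
          else (counts.insert (L[t]'ht') (counts.getD (L[t]'ht') 0 - 1)).getD x 0 :=
      fun x => PySem.Dict.getD_insert _ _ x _ 0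
    have hf2 : ∀ x, (((counts.insert (L[t]'ht') (counts.getD (L[t]'ht') 0 - 1)).insert
            (L[t + 10]'ht)
            ((counts.insert (L[t]'ht') (counts.getD (L[t]'ht') 0 - 1)).getD (L[t + 10]'ht) 0 + 1)).getD x 0)
        = ((pvWin L (t + 1)).count x : Int) := by
      intro x
      rw [h2 x, hmid2 x]
      by_cases hxi : x = L[t + 10]'ht
      · subst hxi
        rw [if_pos rfl, if_pos rfl, h1, if_neg (fun h => hne h.symm), hc, hmid1,
            if_neg (fun h => hne h.symm)]
        try omega
      · rw [if_neg hxi, if_neg hxi, h1]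
        by_cases hxo : x = L[t]'ht'
        · subst hxo
          rw [if_pos rfl, hc, hmid1, if_pos rfl]
          try omega
        · rw [if_neg hxo, hc, hmid1, if_neg hxo]
          try omega
    have hsF : satisfied = (need.items.countP (fun p => counts.getD p.1 0 == p.2) : Int) := by
      rw [hs]
      unfold pvSat
      exact (congrArg _ (List.countP_congr (fun p _ => by rw [hc p.1]))).symm
    have hd1 : (need.items.countP
          (fun p => (counts.insert (L[t]'ht') (counts.getD (L[t]'ht') 0 - 1)).getD p.1 0 == p.2) : Int)
        = (need.items.countP (fun p => counts.getD p.1 0 == p.2) : Int)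
          + (if some ((counts.insert (L[t]'ht') (counts.getD (L[t]'ht') 0 - 1)).getD (L[t]'ht') 0)
                == need.get? (L[t]'ht') then 1 else 0)
          - (if some (counts.getD (L[t]'ht') 0) == need.get? (L[t]'ht') then 1 else 0) :=
      pv_sat_delta need.items hndl (fun x => counts.getD x 0)
        (fun x => (counts.insert (L[t]'ht') (counts.getD (L[t]'ht') 0 - 1)).getD x 0)
        (L[t]'ht') (fun x hx => by simp only [h1 x, if_neg hx])
    have hd2 : (need.items.countP
          (fun p => ((counts.insert (L[t]'ht') (counts.getD (L[t]'ht') 0 - 1)).insert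
              (L[t + 10]'ht)
              ((counts.insert (L[t]'ht') (counts.getD (L[t]'ht') 0 - 1)).getD (L[t + 10]'ht) 0 + 1)).getD p.1 0
            == p.2) : Int)
        = (need.items.countP
            (fun p => (counts.insert (L[t]'ht') (counts.getD (L[t]'ht') 0 - 1)).getD p.1 0 == p.2) : Int)
          + (if some (((counts.insert (L[t]'ht') (counts.getD (L[t]'ht') 0 - 1)).insert
                (L[t + 10]'ht)
                ((counts.insert (L[t]'ht') (counts.getD (L[t]'ht') 0 - 1)).getD (L[t + 10]'ht) 0 + 1)).getD (L[t + 10]'ht) 0)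
                == need.get? (L[t + 10]'ht) then 1 else 0)
          - (if some ((counts.insert (L[t]'ht') (counts.getD (L[t]'ht') 0 - 1)).getD (L[t + 10]'ht) 0)
                == need.get? (L[t + 10]'ht) then 1 else 0) :=
      pv_sat_delta need.items hndl
        (fun x => (counts.insert (L[t]'ht') (counts.getD (L[t]'ht') 0 - 1)).getD x 0)
        (fun x => ((counts.insert (L[t]'ht') (counts.getD (L[t]'ht') 0 - 1)).insert
            (L[t + 10]'ht)
            ((counts.insert (L[t]'ht') (counts.getD (L[t]'ht') 0 - 1)).getD (L[t + 10]'ht) 0 + 1)).getD x 0)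
        (L[t + 10]'ht) (fun x hx => by simp only [h2 x, if_neg hx])
    have hsat1 : pvSat need L (t + 1)
        = (need.items.countP
            (fun p => ((counts.insert (L[t]'ht') (counts.getD (L[t]'ht') 0 - 1)).insert
                (L[t + 10]'ht)
                ((counts.insert (L[t]'ht') (counts.getD (L[t]'ht') 0 - 1)).getD (L[t + 10]'ht) 0 + 1)).getD p.1 0
              == p.2) : Int) := by
      unfold pvSat
      exact (congrArg _ (List.countP_congr (fun p _ => by rw [hf2 p.1]))).symm
    refine ⟨_, ?_, hf2⟩
    simp only [altStep, ne_eq]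
    rw [if_pos hne]
    have hs4 : (if some (((counts.insert (L[t]'ht') (counts.getD (L[t]'ht') 0 - 1)).insert
            (L[t + 10]'ht)
            ((counts.insert (L[t]'ht') (counts.getD (L[t]'ht') 0 - 1)).getD (L[t + 10]'ht) 0 + 1)).getD (L[t + 10]'ht) 0)
            == need.get? (L[t + 10]'ht)
        then (if some ((counts.insert (L[t]'ht') (counts.getD (L[t]'ht') 0 - 1)).getD (L[t + 10]'ht) 0)
                == need.get? (L[t + 10]'ht)
              then (if some ((counts.insert (L[t]'ht') (counts.getD (L[t]'ht') 0 - 1)).getD (L[t]'ht') 0)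
                      == need.get? (L[t]'ht')
                    then (if some (counts.getD (L[t]'ht') 0) == need.get? (L[t]'ht')
                          then satisfied - 1 else satisfied) + 1
                    else (if some (counts.getD (L[t]'ht') 0) == need.get? (L[t]'ht')
                          then satisfied - 1 else satisfied)) - 1
              else (if some ((counts.insert (L[t]'ht') (counts.getD (L[t]'ht') 0 - 1)).getD (L[t]'ht') 0)
                      == need.get? (L[t]'ht')
                    then (if some (counts.getD (L[t]'ht') 0) == need.get? (L[t]'ht')
                          then satisfied - 1 else satisfied) + 1
                    else (if some (counts.getD (L[t]'ht') 0) == need.get? (L[t]'ht')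
                          then satisfied - 1 else satisfied))) + 1
        else (if some ((counts.insert (L[t]'ht') (counts.getD (L[t]'ht') 0 - 1)).getD (L[t + 10]'ht) 0)
                == need.get? (L[t + 10]'ht)
              then (if some ((counts.insert (L[t]'ht') (counts.getD (L[t]'ht') 0 - 1)).getD (L[t]'ht') 0)
                      == need.get? (L[t]'ht')
                    then (if some (counts.getD (L[t]'ht') 0) == need.get? (L[t]'ht')
                          then satisfied - 1 else satisfied) + 1
                    else (if some (counts.getD (L[t]'ht') 0) == need.get? (L[t]'ht')
                          then satisfied - 1 else satisfied)) - 1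
              else (if some ((counts.insert (L[t]'ht') (counts.getD (L[t]'ht') 0 - 1)).getD (L[t]'ht') 0)
                      == need.get? (L[t]'ht')
                    then (if some (counts.getD (L[t]'ht') 0) == need.get? (L[t]'ht')
                          then satisfied - 1 else satisfied) + 1
                    else (if some (counts.getD (L[t]'ht') 0) == need.get? (L[t]'ht')
                          then satisfied - 1 else satisfied))))
        = pvSat need L (t + 1) := by
      rw [hsat1, hsF]
      split_ifs at hd1 hd2 ⊢ <;> omega
    rw [hs4]
    have harith : (if pvSat need L (t + 1) = (need.size : Int) then answer + 1 else answer)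
        = answer + (if pvSat need L (t + 1) = (need.size : Int) then 1 else 0) := by
      split_ifs <;> omega
    rw [harith]

-- the whole sliding-window fold counts the satisfied windows t+1 … t+n
theorem pv_main_loop (need : PySem.Dict String Int) (L : List String)
    (hnd : need.keys.Nodup) :
    ∀ (n t : Nat) (counts : PySem.Dict String Int) (satisfied answer : Int),
      L.length = t + 10 + n →
      (∀ x, counts.getD x 0 = ((pvWin L t).count x : Int)) →
      satisfied = pvSat need L t →
      (((L.drop t).zip (L.drop (t + 10))).foldl (altStep need) (counts, satisfied, answer)).2.2
        = answer + (((List.range' (t + 1) n).countP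
            (fun u => decide (pvSat need L u = (need.size : Int)))) : Int) := by
  intro n
  induction n with
  | zero =>
      intro t counts satisfied answer hm hc hs
      rw [show L.drop (t + 10) = [] from List.drop_eq_nil_of_le (by omega), List.zip_nil_right]
      simp
  | succ n ih =>
      intro t counts satisfied answer hm hc hs
      have ht : t + 10 < L.length := by omega
      rw [List.drop_eq_getElem_cons (show t < L.length by omega),
          List.drop_eq_getElem_cons ht, List.zip_cons_cons, List.foldl_cons]
      obtain ⟨c', hstep, hc'⟩ := pv_step_ok need L t counts satisfied answer hnd ht hc hs
      rw [hstep]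
      rw [ih (t + 1) c' _ _ (by omega) hc' rfl]
      rw [List.range'_succ]
      simp only [List.countP_cons, decide_eq_true_eq]
      push_cast
      split_ifs <;> omega

-- A's per-window counter dict equals the window count
theorem pv_dg_getD (discount : List String) (u : Nat) (hu : u + 10 ≤ discount.length) (x : String) :
    ((PySem.List.pyRange (u : Int) ((u : Int) + 10) 1).foldl
        (fun d j => d.modify (PySem.List.pyGetD discount j "") 0 (· + 1))
        PySem.Dict.empty).getD x 0
      = ((pvWin discount u).count x : Int) := by
  rw [PySem.List.pyRange_one]
  have h10 : (((u : Int) + 10) - (u : Int)).toNat = 10 := by omega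
  rw [h10, List.foldl_map]
  rw [PySem.List.foldl_congr_mem _ _
    (fun (d : PySem.Dict String Int) (k : Nat) => d.modify (discount.getD (u + k) "") 0 (· + 1)) _
    (by
      intro d k hk
      have hcast : ((u : Int) + (k : Int)) = ((u + k : Nat) : Int) := by push_cast; ring
      rw [hcast, PySem.List.pyGetD_natCast])]
  rw [← List.foldl_map (f := fun k => discount.getD (u + k) "")
      (g := fun (d : PySem.Dict String Int) x => d.modify x 0 (· + 1))]
  have hwin : (List.range 10).map (fun k => discount.getD (u + k) "") = pvWin discount u := by
    apply List.ext_getElem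
    · simp [pvWin]; omega
    · intro j h1 h2
      simp only [List.getElem_map, List.getElem_range]
      show discount.getD (u + j) "" = ((discount.drop u).take 10)[j]
      rw [List.getElem_take, List.getElem_drop]
      exact List.getD_eq_getElem _ _ (by simp [pvWin] at h2; omega)
  rw [hwin, PySem.Dict.getD_foldl_modify_add_one, PySem.Dict.getD_empty]
  simp

-- A's inner flag fold is a negated `any`
theorem pv_flag_fold (want : List String) (number : List Int) (dg : PySem.Dict String Int) :
    ((PySem.List.pyRange 0 (want.length : Int) 1).foldl
      (fun f k =>
        if f then
          if dg.getD (PySem.List.pyGetD want k "") 0 ≠ PySem.List.pyGetD number k 0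
          then false else f
        else f) true)
    = !((PySem.List.pyRange 0 (want.length : Int) 1).any
        (fun k => decide (dg.getD (PySem.List.pyGetD want k "") 0 ≠ PySem.List.pyGetD number k 0))) := by
  have hfun : (fun (f : Bool) (k : Int) =>
      if f then
        if dg.getD (PySem.List.pyGetD want k "") 0 ≠ PySem.List.pyGetD number k 0
        then false else f
      else f)
    = (fun (f : Bool) (k : Int) =>
        if (decide (dg.getD (PySem.List.pyGetD want k "") 0 ≠ PySem.List.pyGetD number k 0)) = true
        then false else f) := by
    funext f k
    cases f <;> simp
  rw [hfun, PySem.List.foldl_if_false_eq]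
  simp

-- A's flag equals the decidable window predicate
theorem pv_flag_char (want : List String) (number : List Int) (discount : List String)
    (hlen : want.length ≤ number.length) (u : Nat) (hu : u + 10 ≤ discount.length) :
    pvFlagA want number discount (u : Int)
      = decide (∀ p ∈ want.zip number, ((pvWin discount u).count p.1 : Int) = p.2) := by
  have hdg := pv_dg_getD discount u hu
  simp only [pvFlagA]
  rw [pv_flag_fold]
  rw [PySem.List.pyRange_zero_nat, List.any_map]
  by_cases hP : ∀ p ∈ want.zip number, ((pvWin discount u).count p.1 : Int) = p.2
  · rw [decide_eq_true hP]
    simp only [Bool.not_eq_true']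
    rw [List.any_eq_false]
    intro k hk
    have hkw : k < want.length := List.mem_range.mp hk
    simp only [Function.comp_apply]
    rw [PySem.List.pyGetD_natCast, PySem.List.pyGetD_natCast,
        List.getD_eq_getElem _ _ hkw, List.getD_eq_getElem _ _ (by omega), hdg]
    simp only [decide_eq_true_eq, ne_eq, not_not]
    exact hP (want[k], number[k]'(by omega))
      ((pv_mem_zip_iff want number hlen _).mpr ⟨k, hkw, rfl⟩)
  · rw [decide_eq_false hP]
    simp only [Bool.not_eq_false']
    rw [List.any_eq_true]
    push_neg at hP
    obtain ⟨p, hp, hne⟩ := hP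
    obtain ⟨k, hk, rfl⟩ := (pv_mem_zip_iff want number hlen p).mp hp
    refine ⟨k, List.mem_range.mpr hk, ?_⟩
    simp only [Function.comp_apply]
    rw [PySem.List.pyGetD_natCast, PySem.List.pyGetD_natCast,
        List.getD_eq_getElem _ _ hk, List.getD_eq_getElem _ _ (by omega), hdg]
    simp only [decide_eq_true_eq, ne_eq]
    exact hne

-- A's value as a countP over window start positions
theorem pv_A_eq (want : List String) (number : List Int) (discount : List String)
    (hlen : want.length ≤ number.length) :
    solution want number discount
      = (((List.range (discount.length - 9)).countP
          (fun u => decide (∀ p ∈ want.zip number,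
            ((pvWin discount u).count p.1 : Int) = p.2))) : Int) := by
  rw [pv_solution_eq]
  rw [PySem.List.pyRange_one]
  have htn : (((discount.length : Int) - 9) - 0).toNat = discount.length - 9 := by omega
  rw [htn, List.countP_map]
  have hcg : ∀ u ∈ List.range (discount.length - 9),
      ((pvFlagA want number discount ∘ fun k : Nat => (0 : Int) + (k : Int)) u = true)
        ↔ ((fun u : Nat => decide (∀ p ∈ want.zip number,
            ((pvWin discount u).count p.1 : Int) = p.2)) u = true) := by
    intro u hu
    have hu' : u + 10 ≤ discount.length := by
      have := List.mem_range.mp hu; omega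
    simp only [Function.comp_apply, zero_add]
    rw [pv_flag_char want number discount hlen u hu']
  rw [List.countP_congr hcg]
  omega

-- ===== VERDICT (by name: the statement is the Claim_ definition above) =====
theorem solution_spec : Claim_equal_solution := by
  intro want number discount _ hpre
  obtain ⟨hlen, hpair⟩ := hpre
  unfold Spec_solution
  by_cases hlen10 : discount.length < 10
  · -- fewer than 10 discount days: no window
    have hA : solution want number discount = 0 := by
      rw [pv_A_eq _ _ _ hlen]
      have h0 : discount.length - 9 = 0 := by omega
      rw [h0]
      simp
    have hB : solution_alt want number discount = 0 := by
      simp only [solution_alt]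
      simp [hlen10]
    rw [hA, hB]
  · -- main case: at least one window
    push_neg at hlen10
    have hcons : ∀ p ∈ want.zip number,
        ((want.zip number).foldl (fun d p => d.insert p.1 p.2) PySem.Dict.empty).get? p.1
          = some p.2 :=
      pv_cons_of_consistent (want.zip number) (hpair hlen10)
    have hiff : ∀ u : Nat,
        (∀ p ∈ want.zip number, ((pvWin discount u).count p.1 : Int) = p.2)
          ↔ pvSat ((want.zip number).foldl (fun d p => d.insert p.1 p.2) PySem.Dict.empty)
              discount u
            = ((((want.zip number).foldl (fun d p => d.insert p.1 p.2)
                PySem.Dict.empty)).size : Int) := by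
      intro u
      rw [pv_all_iff (want.zip number) (fun x => ((pvWin discount u).count x : Int)) hcons]
      unfold pvSat
      constructor
      · intro h
        have hcp : (((want.zip number).foldl (fun d p => d.insert p.1 p.2)
              PySem.Dict.empty).items.countP
              (fun p => ((pvWin discount u).count p.1 : Int) == p.2))
            = ((want.zip number).foldl (fun d p => d.insert p.1 p.2)
                PySem.Dict.empty).items.length :=
          List.countP_eq_length.mpr (fun p hp => by simp [h p hp])
        rw [hcp]
        rfl
      · intro h p hp
        have hlen2 : (((want.zip number).foldl (fun d p => d.insert p.1 p.2)
              PySem.Dict.empty).items.countP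
              (fun p => ((pvWin discount u).count p.1 : Int) == p.2))
            = ((want.zip number).foldl (fun d p => d.insert p.1 p.2)
                PySem.Dict.empty).items.length := by
          exact_mod_cast h
        have := List.countP_eq_length.mp hlen2 p hp
        simpa using this
    have hB : solution_alt want number discount
        = (if pvSat ((want.zip number).foldl (fun d p => d.insert p.1 p.2) PySem.Dict.empty)
              discount 0
            = ((((want.zip number).foldl (fun d p => d.insert p.1 p.2)
                PySem.Dict.empty)).size : Int) then 1 else 0)
          + (((List.range' 1 (discount.length - 10)).countP
              (fun u => decide (pvSat ((want.zip number).foldl (fun d p => d.insert p.1 p.2)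
                  PySem.Dict.empty) discount u
                = ((((want.zip number).foldl (fun d p => d.insert p.1 p.2)
                    PySem.Dict.empty)).size : Int)))) : Int) := by
      simp only [solution_alt]
      rw [if_neg (by omega)]
      rw [PySem.List.slice_from discount (by norm_num),
          PySem.List.slice_to discount (by norm_num)]
      rw [show ((10 : Int)).toNat = 10 from rfl]
      have hc0 : ∀ x, ((List.take 10 discount).foldl
            (fun d x => d.insert x (d.getD x 0 + 1)) PySem.Dict.empty).getD x 0
          = ((pvWin discount 0).count x : Int) := by
        intro x
        rw [PySem.Dict.getD_foldl_insert_add_one, PySem.Dict.getD_empty]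
        simp [pvWin]
      have hs0 : ((((want.zip number).foldl (fun d p => d.insert p.1 p.2)
            PySem.Dict.empty).items.countP
            (fun p => ((List.take 10 discount).foldl
                (fun d x => d.insert x (d.getD x 0 + 1)) PySem.Dict.empty).getD p.1 0
              == p.2)) : Int)
          = pvSat ((want.zip number).foldl (fun d p => d.insert p.1 p.2) PySem.Dict.empty)
              discount 0 := by
        unfold pvSat
        exact congrArg _ (List.countP_congr (fun p _ => by rw [hc0 p.1]))
      rw [hs0]
      have hzip : discount.zip (List.drop 10 discount)
          = (discount.drop 0).zip (discount.drop (0 + 10)) := by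
        rw [List.drop_zero]
      rw [hzip]
      rw [pv_main_loop _ discount (pv_need_nodup _) (discount.length - 10) 0 _ _ _
          (by omega) hc0 rfl]
    rw [hB, pv_A_eq _ _ _ hlen]
    rw [List.range_eq_range', show discount.length - 9 = (discount.length - 10) + 1 by omega,
        List.range'_succ]
    simp only [List.countP_cons]
    have hcg2 : ∀ u ∈ List.range' (0 + 1) (discount.length - 10),
        ((fun u : Nat => decide (∀ p ∈ want.zip number,
            ((pvWin discount u).count p.1 : Int) = p.2)) u = true)
          ↔ ((fun u : Nat => decide
              (pvSat ((want.zip number).foldl (fun d p => d.insert p.1 p.2)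
                  PySem.Dict.empty) discount u
                = ((((want.zip number).foldl (fun d p => d.insert p.1 p.2)
                    PySem.Dict.empty)).size : Int))) u = true) := by
      intro u _
      simp only [decide_eq_true_eq]
      exact hiff u
    rw [List.countP_congr hcg2]
    have h0 : (decide (∀ p ∈ want.zip number, ((pvWin discount 0).count p.1 : Int) = p.2))
        = decide (pvSat ((want.zip number).foldl (fun d p => d.insert p.1 p.2)
            PySem.Dict.empty) discount 0
          = ((((want.zip number).foldl (fun d p => d.insert p.1 p.2)
              PySem.Dict.empty)).size : Int)) := by
      rw [decide_eq_decide]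
      exact hiff 0
    rw [h0]
    simp only [decide_eq_true_eq]
    push_cast
    split_ifs <;> omega
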